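-- pv_equiv track=rewrite | github.com/lastseenjustnow/python-algo | educative/data_structures/arrays/solutions.py | triplet_with_smaller_sum
-- ===== SOURCE A (Python) =====
-- def triplet_with_smaller_sum(arr, target):
--     count = 0
--     for first_index in range(len(arr) - 2):
--         for second_index in range(first_index + 1, len(arr) - 1):
--             if arr[first_index] + arr[second_index] >= target:
--                 continue
--             for third_index in range(second_index + 1, len(arr)):
--                 count += 1 if arr[first_index] + arr[second_index] + arr[third_index] < target else 0
--
--     return count
-- ===== SOURCE B (Python) =====
-- def _count_less(a, v):
--     # number of elements of the sorted list a that are < v (hand-rolled bisect_left)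
--     lo, hi = 0, len(a)
--     while lo < hi:
--         mid = (lo + hi) // 2
--         if a[mid] < v:
--             lo = mid + 1
--         else:
--             hi = mid
--     return lo
--
--
-- def triplet_with_smaller_sum(arr, target):
--     count = 0
--     for j in range(1, len(arr) - 1):
--         suffix = sorted(arr[j + 1:])
--         for i in range(j):
--             pair = arr[i] + arr[j]
--             if pair < target:
--                 count += _count_less(suffix, target - pair)
--     return count
-- ===== Notes on version B (the rewrite author's own statement) =====
-- stated objective: faster
-- what changed: The innermost linear scan over arr[j+1:] is replaced by sorting each suffix once and counting qualifying third elements with a hand-rolled bisect_left binary search (the count only depends on the suffix multiset, so sorting preserves A's exact value, including its pair>=target pruning).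
import Mathlib
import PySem

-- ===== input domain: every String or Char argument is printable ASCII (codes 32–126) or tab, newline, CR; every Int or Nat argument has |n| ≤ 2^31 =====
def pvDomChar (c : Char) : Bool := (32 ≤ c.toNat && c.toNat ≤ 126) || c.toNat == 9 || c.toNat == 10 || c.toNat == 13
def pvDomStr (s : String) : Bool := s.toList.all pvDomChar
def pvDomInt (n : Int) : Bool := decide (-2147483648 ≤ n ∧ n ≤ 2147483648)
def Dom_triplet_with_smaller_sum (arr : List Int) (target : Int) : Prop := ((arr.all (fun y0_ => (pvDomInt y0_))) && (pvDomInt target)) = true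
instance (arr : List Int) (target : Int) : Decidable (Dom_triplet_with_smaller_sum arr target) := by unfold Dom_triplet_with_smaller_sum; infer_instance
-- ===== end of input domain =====

-- B replaces A's innermost linear scan by a binary search over the sorted suffix; same return value, proved below.

-- ===== PORT A =====
def triplet_with_smaller_sum (arr : List Int) (target : Int) : Int :=
  let n : Int := (arr.length : Int)
  (PySem.List.pyRange 0 (n - 2) 1).foldl
    (fun count first_index =>
      (PySem.List.pyRange (first_index + 1) (n - 1) 1).foldl
        (fun count second_index =>
          if PySem.List.pyGetD arr first_index 0 + PySem.List.pyGetD arr second_index 0 ≥ target then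
            count
          else
            (PySem.List.pyRange (second_index + 1) n 1).foldl
              (fun count third_index =>
                count +
                  (if PySem.List.pyGetD arr first_index 0 + PySem.List.pyGetD arr second_index 0 +
                        PySem.List.pyGetD arr third_index 0 < target then (1 : Int) else 0))
              count)
        count)
    0

-- ===== PORT B =====
-- `_count_less`: the hand-rolled bisect_left loop of Source B; lo/hi stay in [0, len(a)] in the
-- Python, so Nat indices are exact there, and `(lo + hi) // 2` on nonnegative ints is Nat division.
def pvCountLess (a : List Int) (v : Int) (lo hi : Nat) : Nat :=
  if h : lo < hi then
    let mid := (lo + hi) / 2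
    if PySem.List.pyGetD a (mid : Int) 0 < v then pvCountLess a v (mid + 1) hi
    else pvCountLess a v lo mid
  else lo
termination_by hi - lo
decreasing_by
  · have h1 : lo ≤ (lo + hi) / 2 := Nat.le_div_iff_mul_le (by omega) |>.mpr (by omega)
    omega
  · have h2 : (lo + hi) / 2 < hi := Nat.div_lt_iff_lt_mul (by omega) |>.mpr (by omega)
    omega

def triplet_with_smaller_sum_alt (arr : List Int) (target : Int) : Int :=
  (PySem.List.pyRange 1 ((arr.length : Int) - 1) 1).foldl
    (fun count j =>
      let suffix := PySem.List.sorted (PySem.List.slice arr (some (j + 1)) none) id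
      (PySem.List.pyRange 0 j 1).foldl
        (fun count i =>
          let pair := PySem.List.pyGetD arr i 0 + PySem.List.pyGetD arr j 0
          if pair < target then
            count + (pvCountLess suffix (target - pair) 0 suffix.length : Int)
          else count)
        count)
    0

-- ===== PRECONDITION & SPEC =====
def Spec_triplet_with_smaller_sum (arr : List Int) (target : Int) (out : Int) : Prop := out = triplet_with_smaller_sum_alt arr target
instance (arr : List Int) (target : Int) (out : Int) : Decidable (Spec_triplet_with_smaller_sum arr target out) := by unfold Spec_triplet_with_smaller_sum; infer_instance

-- ===== CLAIM (what is proved, stated in full; the proofs are below) =====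
def Claim_equal_triplet_with_smaller_sum : Prop := ∀ (arr : List Int) (target : Int), Dom_triplet_with_smaller_sum arr target → Spec_triplet_with_smaller_sum arr target (triplet_with_smaller_sum arr target)

-- ===== LEMMAS AND PROOFS =====

/-- The common triple term at Nat positions `i < j`: if the pair at (i, j) sums below `t`,
the number of later elements completing it to a sum below `t`, else 0. -/
def pvT (arr : List Int) (t : Int) (i j : Nat) : Int :=
  if arr.getD i 0 + arr.getD j 0 < t then
    ((arr.drop (j + 1)).countP (fun z => decide (arr.getD i 0 + arr.getD j 0 + z < t)) : Int)
  else 0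

lemma ite_flip (x t C : Int) : (if x ≥ t then (0:Int) else C) = (if x < t then C else 0) := by
  by_cases h : t ≤ x
  · rw [if_pos h, if_neg (by omega)]
  · rw [if_neg h, if_pos (by omega)]

/-- A list whose first `m` positions are exactly the ones satisfying `p` has `countP p = m`. -/
lemma countP_eq_of_iff (p : Int → Bool) :
    ∀ (a : List Int) (m : Nat), m ≤ a.length →
      (∀ i (h : i < a.length), (p a[i] = true ↔ i < m)) → a.countP p = m := by
  intro a
  induction a with
  | nil => intro m hm _; simp at hm; simp [hm]
  | cons x rest ih =>
    intro m hm hiff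
    have h0 := hiff 0 (by simp)
    cases m with
    | zero =>
      have hx : p x = false := by
        simpa using (by simpa using h0)
      have hrest : rest.countP p = 0 := ih 0 (by omega) (fun i h => by
        have := hiff (i+1) (by simpa using Nat.succ_lt_succ h)
        simpa using this)
      rw [List.countP_cons, hx]
      simp [hrest]
    | succ m' =>
      have hx : p x = true := by simpa using h0.mpr (by omega)
      have : rest.countP p = m' := ih m' (by simpa using hm) (fun i h => by
        have := hiff (i+1) (by simpa using Nat.succ_lt_succ h)
        simpa [Nat.succ_lt_succ_iff] using this)
      rw [List.countP_cons, hx]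
      simp [this]

/-- Invariant of the binary-search loop: on a sorted list, it computes `countP (· < v)`. -/
lemma pvCountLess_eq (a : List Int) (v : Int) (ha : a.Pairwise (· ≤ ·)) :
    ∀ (d lo hi : Nat), hi - lo ≤ d → lo ≤ hi → hi ≤ a.length →
      (∀ p (h : p < a.length), p < lo → a[p] < v) →
      (∀ p (h : p < a.length), hi ≤ p → ¬ a[p] < v) →
      pvCountLess a v lo hi = a.countP (fun z => decide (z < v)) := by
  intro d
  induction d with
  | zero =>
    intro lo hi hd hle hlen hlo hhi
    rw [pvCountLess, dif_neg (by omega)]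
    refine (countP_eq_of_iff _ a lo (by omega) ?_).symm
    intro i h
    constructor
    · intro hp
      by_contra hge
      exact hhi i h (by omega) (by simpa using hp)
    · intro hlt
      simpa using hlo i h hlt
  | succ d ih =>
    intro lo hi hd hle hlen hlo hhi
    by_cases h : lo < hi
    · rw [pvCountLess, dif_pos h]
      have hmono := List.pairwise_iff_getElem.mp ha
      have h1 : lo ≤ (lo + hi) / 2 := Nat.le_div_iff_mul_le (by omega) |>.mpr (by omega)
      have h2 : (lo + hi) / 2 < hi := Nat.div_lt_iff_lt_mul (by omega) |>.mpr (by omega)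
      have hmidlen : (lo + hi) / 2 < a.length := by omega
      have hget : PySem.List.pyGetD a (((lo + hi) / 2 : Nat) : Int) 0 = a[(lo + hi) / 2] := by
        rw [PySem.List.pyGetD_natCast]
        exact List.getD_eq_getElem a 0 hmidlen
      simp only [hget]
      by_cases hv : a[(lo + hi) / 2] < v
      · rw [if_pos hv]
        exact ih ((lo + hi) / 2 + 1) hi (by omega) (by omega) hlen
          (fun p hp hplt => by
            rcases Nat.lt_succ_iff_lt_or_eq.mp hplt with h' | h'
            · rcases Nat.lt_or_ge p lo with h'' | h''
              · exact hlo p hp h''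
              · calc a[p] ≤ a[(lo + hi) / 2] := by
                      rcases Nat.lt_or_ge p ((lo + hi) / 2) with hq | hq
                      · exact hmono p ((lo + hi) / 2) hp hmidlen hq
                      · have : p = (lo + hi) / 2 := by omega
                        simp [this]
                  _ < v := hv
            · subst h'; exact hv)
          hhi
      · rw [if_neg hv]
        exact ih lo ((lo + hi) / 2) (by omega) (by omega) (by omega) hlo
          (fun p hp hple => by
            intro hcon
            rcases Nat.eq_or_lt_of_le hple with h' | h'
            · exact hv (h' ▸ hcon)
            · exact hv (lt_of_le_of_lt (hmono ((lo + hi) / 2) p hmidlen hp h') hcon))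
    · rw [pvCountLess, dif_neg h]
      refine (countP_eq_of_iff _ a lo (by omega) ?_).symm
      intro i hle'
      constructor
      · intro hp
        by_contra hge
        exact hhi i hle' (by omega) (by simpa using hp)
      · intro hlt
        simpa using hlo i hle' hlt

lemma countLess_sorted (xs : List Int) (v : Int) :
    pvCountLess (PySem.List.sorted xs id) v 0 (PySem.List.sorted xs id).length
      = xs.countP (fun z => decide (z < v)) := by
  have hpair : (PySem.List.sorted xs id).Pairwise (· ≤ ·) := by
    simpa using PySem.List.sorted_pairwise xs id
  rw [pvCountLess_eq (PySem.List.sorted xs id) v hpair (PySem.List.sorted xs id).length 0 _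
      (by omega) (by omega) (le_refl _) (by omega) (fun p h hle => by omega)]
  exact List.Perm.countP_eq _ (PySem.List.sorted_perm xs id false)

/-- A's innermost loop counts the suffix elements completing the pair to a sum below `t`. -/
lemma innerA (arr : List Int) (t x s c : Int) (hs : 0 ≤ s) :
    (PySem.List.pyRange (s + 1) ((arr.length : Int)) 1).foldl
        (fun count k => count + (if x + PySem.List.pyGetD arr k 0 < t then (1 : Int) else 0)) c
      = c + ((arr.drop (s + 1).toNat).countP (fun z => decide (x + z < t)) : Int) := by
  rw [PySem.List.foldl_pyRange_pyGetD' arr 0 (fun acc z => acc + (if x + z < t then (1:Int) else 0)) c (by omega)]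
  rw [PySem.List.foldl_add]
  congr 1
  rw [← PySem.List.sum_map_ite_one_zero (fun z => decide (x + z < t))]
  simp

lemma A_fold (arr : List Int) (t : Int) :
    triplet_with_smaller_sum arr t
      = ((PySem.List.pyRange 0 ((arr.length : Int) - 2) 1).map
          (fun f => ((PySem.List.pyRange (f + 1) ((arr.length : Int) - 1) 1).map
            (fun s => if PySem.List.pyGetD arr f 0 + PySem.List.pyGetD arr s 0 ≥ t then 0
              else ((arr.drop (s + 1).toNat).countP
                (fun z => decide (PySem.List.pyGetD arr f 0 + PySem.List.pyGetD arr s 0 + z < t)) : Int))).sum)).sum := by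
  unfold triplet_with_smaller_sum
  rw [PySem.List.foldl_congr_mem _ _
      (fun count f => count + ((PySem.List.pyRange (f + 1) ((arr.length : Int) - 1) 1).map
        (fun s => if PySem.List.pyGetD arr f 0 + PySem.List.pyGetD arr s 0 ≥ t then 0
          else ((arr.drop (s + 1).toNat).countP
            (fun z => decide (PySem.List.pyGetD arr f 0 + PySem.List.pyGetD arr s 0 + z < t)) : Int))).sum) 0
      ?_]
  · rw [PySem.List.foldl_add]
    simp
  · intro count f hf
    have hf0 : 0 ≤ f := (PySem.List.mem_pyRange_one.mp hf).1
    rw [PySem.List.foldl_congr_mem _ _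
        (fun count s => count + (if PySem.List.pyGetD arr f 0 + PySem.List.pyGetD arr s 0 ≥ t then 0
          else ((arr.drop (s + 1).toNat).countP
            (fun z => decide (PySem.List.pyGetD arr f 0 + PySem.List.pyGetD arr s 0 + z < t)) : Int))) count
        ?_]
    · rw [PySem.List.foldl_add]
    · intro c s hsmem
      have hs0 : 0 ≤ s := by
        have := (PySem.List.mem_pyRange_one.mp hsmem).1
        omega
      by_cases hc : PySem.List.pyGetD arr f 0 + PySem.List.pyGetD arr s 0 ≥ t
      · simp only [if_pos hc]
        omega
      · simp only [if_neg hc]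
        exact innerA arr t _ s c hs0

lemma B_fold (arr : List Int) (t : Int) :
    triplet_with_smaller_sum_alt arr t
      = ((PySem.List.pyRange 1 ((arr.length : Int) - 1) 1).map
          (fun j => ((PySem.List.pyRange 0 j 1).map
            (fun i =>
              if PySem.List.pyGetD arr i 0 + PySem.List.pyGetD arr j 0 < t then
                ((arr.drop (j + 1).toNat).countP
                  (fun z => decide (PySem.List.pyGetD arr i 0 + PySem.List.pyGetD arr j 0 + z < t)) : Int)
              else 0)).sum)).sum := by
  unfold triplet_with_smaller_sum_alt
  rw [PySem.List.foldl_congr_mem _ _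
      (fun count j => count + ((PySem.List.pyRange 0 j 1).map
        (fun i =>
          if PySem.List.pyGetD arr i 0 + PySem.List.pyGetD arr j 0 < t then
            ((arr.drop (j + 1).toNat).countP
              (fun z => decide (PySem.List.pyGetD arr i 0 + PySem.List.pyGetD arr j 0 + z < t)) : Int)
          else 0)).sum) 0 ?_]
  · rw [PySem.List.foldl_add]
    simp
  · intro count j hj
    have hj0 : 0 ≤ j := by
      have := (PySem.List.mem_pyRange_one.mp hj).1
      omega
    simp only
    rw [PySem.List.foldl_congr_mem _ _
        (fun count i =>
          count + (if PySem.List.pyGetD arr i 0 + PySem.List.pyGetD arr j 0 < t then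
            ((arr.drop (j + 1).toNat).countP
              (fun z => decide (PySem.List.pyGetD arr i 0 + PySem.List.pyGetD arr j 0 + z < t)) : Int)
          else 0)) count ?_]
    · rw [PySem.List.foldl_add]
    · intro c i hi
      by_cases hc : PySem.List.pyGetD arr i 0 + PySem.List.pyGetD arr j 0 < t
      · simp only [if_pos hc]
        congr 1
        have hslice : PySem.List.slice arr (some (j + 1)) none = arr.drop (j + 1).toNat :=
          PySem.List.slice_from arr (by omega)
        rw [hslice, countLess_sorted]
        rw [Int.natCast_inj]
        apply List.countP_congr
        intro z hz
        simp only [decide_eq_true_eq]; omega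
      · simp only [if_neg hc]
        omega

/-- Triangle exchange: summing rows `(f, s)` with `s > f` equals summing columns `(i, j)` with `i < j`. -/
lemma tri_swap (T : Nat → Nat → Int) :
    ∀ m : Nat,
      ((List.range m).map (fun f => ((List.range (m - (f + 1))).map (fun k => T f (f + 1 + k))).sum)).sum
        = ((List.range m).map (fun j => ((List.range j).map (fun i => T i j)).sum)).sum := by
  intro m
  induction m with
  | zero => simp
  | succ m ih =>
    rw [List.range_succ, List.map_append, List.map_append, List.sum_append, List.sum_append]
    have hrow : ((List.range m).map (fun f => ((List.range (m + 1 - (f + 1))).map (fun k => T f (f + 1 + k))).sum))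
        = (List.range m).map (fun f => ((List.range (m - (f + 1))).map (fun k => T f (f + 1 + k))).sum + T f m) := by
      apply List.map_congr_left
      intro f hf
      have hf' : f < m := List.mem_range.mp hf
      have h1 : m + 1 - (f + 1) = (m - (f + 1)) + 1 := by omega
      rw [h1, List.range_succ, List.map_append, List.sum_append]
      have h2 : f + 1 + (m - (f + 1)) = m := by omega
      simp [h2]
    rw [hrow]
    have hsplit : ((List.range m).map (fun f => ((List.range (m - (f + 1))).map (fun k => T f (f + 1 + k))).sum + T f m)).sum
        = ((List.range m).map (fun f => ((List.range (m - (f + 1))).map (fun k => T f (f + 1 + k))).sum)).sum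
          + ((List.range m).map (fun f => T f m)).sum :=
      PySem.List.sum_map_add_int _ _ _
    rw [hsplit, ih]
    simp

lemma A_eq_SA (arr : List Int) (t : Int) :
    triplet_with_smaller_sum arr t
      = ((List.range (arr.length - 1)).map
          (fun f => ((List.range ((arr.length - 1) - (f + 1))).map (fun k => pvT arr t f (f + 1 + k))).sum)).sum := by
  rw [A_fold, PySem.List.pyRange_one, List.map_map]
  have hT : ((arr.length : Int) - 2 - 0).toNat = arr.length - 2 := by omega
  rw [hT]
  rcases Nat.lt_or_ge arr.length 2 with hsmall | hbig
  · have h1 : arr.length - 2 = 0 := by omega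
    have h2 : arr.length - 1 = 0 := by omega
    rw [h1, h2]; simp
  · have h3 : arr.length - 1 = (arr.length - 2) + 1 := by omega
    rw [h3, List.range_succ, List.map_append, List.sum_append]
    have hlast : ((List.range ((arr.length - 2 + 1) - ((arr.length - 2) + 1))).map
        (fun k => pvT arr t (arr.length - 2) ((arr.length - 2) + 1 + k))).sum = 0 := by
      simp
    simp only [List.map_cons, List.map_nil, List.sum_cons, List.sum_nil, hlast, add_zero]
    congr 1
    apply List.map_congr_left
    intro f hf
    simp only [Function.comp_apply, zero_add]
    rw [PySem.List.pyRange_one, List.map_map]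
    have hT2 : ((arr.length : Int) - 1 - ((f : Int) + 1)).toNat = (arr.length - 2 + 1) - (f + 1) := by omega
    rw [hT2]
    congr 1
    apply List.map_congr_left
    intro k hk
    simp only [Function.comp_apply]
    have e1 : ((f : Int) + 1 + (k : Int)) = ((f + 1 + k : Nat) : Int) := by push_cast; ring
    rw [e1, PySem.List.pyGetD_natCast, PySem.List.pyGetD_natCast]
    have e2 : (((f + 1 + k : Nat) : Int) + 1).toNat = (f + 1 + k) + 1 := by omega
    rw [e2, ite_flip]
    rfl

lemma B_eq_SB (arr : List Int) (t : Int) :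
    triplet_with_smaller_sum_alt arr t
      = ((List.range (arr.length - 1)).map
          (fun j => ((List.range j).map (fun i => pvT arr t i j)).sum)).sum := by
  rw [B_fold, PySem.List.pyRange_one, List.map_map]
  have hT : ((arr.length : Int) - 1 - 1).toNat = arr.length - 2 := by omega
  rw [hT]
  rcases Nat.lt_or_ge arr.length 2 with hsmall | hbig
  · have h1 : arr.length - 2 = 0 := by omega
    have h2 : arr.length - 1 = 0 := by omega
    rw [h1, h2]; simp
  · have h3 : arr.length - 1 = (arr.length - 2) + 1 := by omega
    rw [h3, List.range_succ_eq_map, List.map_cons, List.sum_cons, List.map_map]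
    simp only [List.range_zero, List.map_nil, List.sum_nil, zero_add]
    congr 1
    apply List.map_congr_left
    intro k hk
    simp only [Function.comp_apply]
    rw [PySem.List.pyRange_one, List.map_map]
    have e0 : (1 + (k : Int) - 0).toNat = k + 1 := by omega
    rw [e0]
    congr 1
    apply List.map_congr_left
    intro i hi
    simp only [Function.comp_apply, zero_add]
    have e1 : (1 + (k : Int)) = ((k + 1 : Nat) : Int) := by push_cast; ring
    rw [e1, PySem.List.pyGetD_natCast, PySem.List.pyGetD_natCast]
    have e2 : (((k + 1 : Nat) : Int) + 1).toNat = (k + 1) + 1 := by omega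
    rw [e2]
    rfl

-- ===== VERDICT (by name: the statement is the Claim_ definition above) =====
theorem triplet_with_smaller_sum_spec : Claim_equal_triplet_with_smaller_sum := by
  intro arr target _
  unfold Spec_triplet_with_smaller_sum
  rw [A_eq_SA, B_eq_SB, tri_swap]
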